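-- pv_equiv track=rewrite | github.com/gen1s/TikTok-Generator | main.py | split_quote
-- ===== SOURCE A (Python) =====
-- def split_quote(quote):
--     sp_quote = quote.split(" ")
--     charcount = 0
--     charcount2 = 0
--     tcharcount = 0
--
--     quote1 = ""
--     quote2 = ""
--     for i in sp_quote:
--
--         tcharcount = tcharcount + len(i)
--         if tcharcount < len(quote)/2:
--             charcount = charcount + len(i)
--             if charcount > 25:
--                 i = i + "\n\n"
--                 charcount = 0
--             quote1 = quote1 + " " + i
--         else:
--             charcount2 = charcount2 + len(i)
--             if charcount2 > 25:
--                 i = i + "\n\n"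
--                 charcount2 = 0
--             quote2 = quote2 + " " + i
--
--     return quote1,quote2
-- ===== SOURCE B (Python) =====
-- def _wrap(words):
--     out = ""
--     count = 0
--     for w in words:
--         count += len(w)
--         if count > 25:
--             w = w + "\n\n"
--             count = 0
--         out = out + " " + w
--     return out
--
--
-- def split_quote(quote):
--     words = quote.split(" ")
--     n = len(quote)
--     total = 0
--     idx = len(words)
--     for j, w in enumerate(words):
--         total += len(w)
--         if 2 * total >= n:
--             idx = j
--             break
--     return _wrap(words[:idx]), _wrap(words[idx:])
-- ===== Notes on version B (the rewrite author's own statement) =====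
-- stated objective: alternative
-- what changed: B first finds the split index with a prefix-sum scan (smallest j where twice the running word-length sum reaches len(quote)), slices the word list there, and builds each half with one shared wrapping helper, instead of A's single loop that threads five state variables and decides the half per word.
import Mathlib
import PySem

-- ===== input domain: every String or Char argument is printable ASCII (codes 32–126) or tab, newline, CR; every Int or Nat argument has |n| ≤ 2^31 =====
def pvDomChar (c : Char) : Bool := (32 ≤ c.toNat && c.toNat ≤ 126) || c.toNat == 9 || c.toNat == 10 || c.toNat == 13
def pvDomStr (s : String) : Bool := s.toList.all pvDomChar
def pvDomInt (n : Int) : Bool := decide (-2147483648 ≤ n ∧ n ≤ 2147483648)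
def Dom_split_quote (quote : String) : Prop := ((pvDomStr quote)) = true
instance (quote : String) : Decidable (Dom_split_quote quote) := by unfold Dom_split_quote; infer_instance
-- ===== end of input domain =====

-- ===== PORT A =====
-- One honest line: B finds the split index by a prefix-sum scan and builds each half
-- with a shared wrapping helper, instead of A's single five-variable loop (objective: alternative).
-- A's 'tcharcount < len(quote)/2' (exact float halving of an int) is ported as '2 * t < n', exact on Int.
def pvStepA (n : Int) (st : Int × Int × Int × String × String) (i : String) :
    Int × Int × Int × String × String :=
  let t := st.2.2.1 + PySem.Str.len i
  if 2 * t < n then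
    let c1 := st.1 + PySem.Str.len i
    if c1 > 25 then (0, st.2.1, t, st.2.2.2.1 ++ " " ++ (i ++ "\n\n"), st.2.2.2.2)
    else (c1, st.2.1, t, st.2.2.2.1 ++ " " ++ i, st.2.2.2.2)
  else
    let c2 := st.2.1 + PySem.Str.len i
    if c2 > 25 then (st.1, 0, t, st.2.2.2.1, st.2.2.2.2 ++ " " ++ (i ++ "\n\n"))
    else (st.1, c2, t, st.2.2.2.1, st.2.2.2.2 ++ " " ++ i)

def split_quote (quote : String) : String × String :=
  let sp_quote := (PySem.Str.split? quote " ").getD []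
  let r := sp_quote.foldl (pvStepA (PySem.Str.len quote)) (0, 0, 0, "", "")
  (r.2.2.2.1, r.2.2.2.2)

-- ===== PORT B =====
-- Source B's _wrap: accumulate word lengths, append "\n\n" and reset when the counter passes 25.
def pvWrap : List String → Int → String → String
  | [], _, out => out
  | w :: rest, count, out =>
      let count := count + PySem.Str.len w
      if count > 25 then pvWrap rest 0 (out ++ " " ++ (w ++ "\n\n"))
      else pvWrap rest count (out ++ " " ++ w)

-- Source B's index loop: smallest j with 2 * (prefix sum of word lengths) >= n; len(words) if never
-- (returning the list length is written as recursing to 0 past the end, the same number).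
def pvFindIdx (n : Int) : List String → Int → Nat
  | [], _ => 0
  | w :: rest, total =>
      let total := total + PySem.Str.len w
      if 2 * total ≥ n then 0 else 1 + pvFindIdx n rest total

def split_quote_alt (quote : String) : String × String :=
  let words := (PySem.Str.split? quote " ").getD []
  let idx := pvFindIdx (PySem.Str.len quote) words 0
  (pvWrap (words.take idx) 0 "", pvWrap (words.drop idx) 0 "")
-- ===== PRECONDITION & SPEC =====
def Spec_split_quote (quote : String) (out : String × String) : Prop := out = split_quote_alt quote
instance (quote : String) (out : String × String) : Decidable (Spec_split_quote quote out) := by unfold Spec_split_quote; infer_instance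

-- ===== CLAIM (what is proved, stated in full; the proofs are below) =====
def Claim_equal_split_quote : Prop := ∀ (quote : String), Dom_split_quote quote → Spec_split_quote quote (split_quote quote)

-- ===== LEMMAS AND PROOFS =====

-- ===== VERDICT (by name: the statement is the Claim_ definition above) =====
-- phase 2: once n ≤ 2*t, every later word lands in quote2, which pvWrap describes.
theorem pvPhase2 (n : Int) (ws : List String) :
    ∀ (c1 c2 t : Int) (q1 q2 : String), n ≤ 2 * t →
      (ws.foldl (pvStepA n) (c1, c2, t, q1, q2)).2.2.2 = (q1, pvWrap ws c2 q2) := by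
  induction ws with
  | nil => intro c1 c2 t q1 q2 h; rfl
  | cons w rest ih =>
      intro c1 c2 t q1 q2 h
      have hw : (0 : Int) ≤ PySem.Str.len w := by simp [PySem.Str.len_eq]
      have hlt : ¬ 2 * (t + PySem.Str.len w) < n := by omega
      simp only [List.foldl_cons, pvStepA, hlt, if_false, pvWrap]
      split
      · exact ih _ _ _ _ _ (by omega)
      · exact ih _ _ _ _ _ (by omega)

-- phase 1: from a state still in quote1 (c2 = 0, q2 = ""), the fold splits at pvFindIdx.
theorem pvPhase1 (n : Int) (ws : List String) :
    ∀ (c1 t : Int) (q1 : String),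
      (ws.foldl (pvStepA n) (c1, 0, t, q1, "")).2.2.2 =
        (pvWrap (ws.take (pvFindIdx n ws t)) c1 q1,
         pvWrap (ws.drop (pvFindIdx n ws t)) 0 "") := by
  induction ws with
  | nil => intro c1 t q1; rfl
  | cons w rest ih =>
      intro c1 t q1
      by_cases hge : 2 * (t + PySem.Str.len w) ≥ n
      · have hlt : ¬ 2 * (t + PySem.Str.len w) < n := by omega
        simp only [pvFindIdx, hge, if_true, List.take_zero, List.drop_zero,
          List.foldl_cons, pvStepA, hlt, if_false, pvWrap]
        split
        · exact pvPhase2 n rest _ _ _ _ _ (by omega)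
        · exact pvPhase2 n rest _ _ _ _ _ (by omega)
      · have hlt : 2 * (t + PySem.Str.len w) < n := by omega
        have htd : ∀ k : Nat, (w :: rest).take (1 + k) = w :: rest.take k ∧
            (w :: rest).drop (1 + k) = rest.drop k := by
          intro k; constructor <;> simp [Nat.add_comm 1 k]
        obtain ⟨ht, hd⟩ := htd (pvFindIdx n rest (t + PySem.Str.len w))
        by_cases hc : c1 + PySem.Str.len w > 25
        · simp only [pvFindIdx, hge, if_false, List.foldl_cons, pvStepA, hlt,
            hc, if_pos, ht, hd, pvWrap]
          exact ih _ (t + PySem.Str.len w) _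
        · simp only [pvFindIdx, hge, if_false, List.foldl_cons, pvStepA, hlt, if_true,
            hc, ht, hd, pvWrap, if_false]
          exact ih _ (t + PySem.Str.len w) _

theorem split_quote_spec : Claim_equal_split_quote := by
  intro quote _
  unfold Spec_split_quote split_quote split_quote_alt
  simpa using pvPhase1 (PySem.Str.len quote) ((PySem.Str.split? quote " ").getD []) 0 0 ""
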